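-- pv_equiv track=rewrite | github.com/hheh47660/silk_waste | uni/CyberChallengeTraining/2024/2024Es4.py | check
-- ===== SOURCE A (Python) =====
-- def check(word, line):
--     j = 0
--     for i in range(len(line)):
--         if line[i:i+len(word)] == word:
--             j = 0
--         else:
--             j += 1
--
--         if(j >= len(word)):
--             return False
--
--
--     return True
-- ===== SOURCE B (Python) =====
-- def check(word, line):
--     # One pass over the occurrences of word (str.find) instead of slicing at
--     # every position: fail iff some occurrence-free gap reaches len(word).
--     m, n = len(word), len(line)
--     prev = -1
--     i = line.find(word)
--     while i != -1:
--         if i - prev > m: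
--             return False
--         prev = i
--         i = line.find(word, i + 1)
--     return n - prev <= m
-- ===== Notes on version B (the rewrite author's own statement) =====
-- stated objective: faster
-- what changed: Instead of slicing and comparing the word at every position of the line (O(n*m)), B iterates only over the occurrence starts produced by str.find and checks the gap before each occurrence and after the last one.
-- outside the precondition, e.g. on check('', ''): A returns True, B returns False
import Mathlib
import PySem

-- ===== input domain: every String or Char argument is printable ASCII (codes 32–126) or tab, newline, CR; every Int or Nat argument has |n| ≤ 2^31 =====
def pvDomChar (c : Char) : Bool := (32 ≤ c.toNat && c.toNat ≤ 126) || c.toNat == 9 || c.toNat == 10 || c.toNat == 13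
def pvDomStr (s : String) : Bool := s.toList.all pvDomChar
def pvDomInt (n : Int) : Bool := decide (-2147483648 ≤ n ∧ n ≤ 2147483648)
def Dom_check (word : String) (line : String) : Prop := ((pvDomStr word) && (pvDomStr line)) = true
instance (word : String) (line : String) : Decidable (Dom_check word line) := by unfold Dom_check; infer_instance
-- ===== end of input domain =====

-- B replaces A's position-by-position slice comparison by one pass over the
-- occurrences of `word` found with str.find, checking the gaps between them.

-- ===== PORT A =====
-- for i in range(len(line)): j = 0 if line[i:i+len(word)] == word else j+1; if j >= len(word): return False
def checkLoop (word line : List Char) (j i : Nat) : Bool :=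
  if _h : i < line.length then
    let j' := if PySem.List.slice line (some (i : Int)) (some ((i : Int) + (word.length : Int))) = word then 0 else j + 1
    if word.length ≤ j' then false
    else checkLoop word line j' (i + 1)
  else true
termination_by line.length - i

def check (word : String) (line : String) : Bool :=
  checkLoop word.toList line.toList 0 0

-- ===== PORT B =====
-- while i != -1: if i - prev > m: return False; prev = i; i = line.find(word, i+1)
-- (fuel = len(line)+2 bounds the iteration count: each found index is strictly
--  larger than the previous one; the fuel-0 value mirrors the loop exit)
def checkAltLoop (word line : List Char) : Nat → Int → Int → Bool
  | 0, prev, _ => decide (((line.length : Int) - prev) ≤ (word.length : Int))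
  | fuel + 1, prev, i =>
    if i = -1 then decide (((line.length : Int) - prev) ≤ (word.length : Int))
    else if (word.length : Int) < i - prev then false
    else checkAltLoop word line fuel i (PySem.Chars.findFrom line word (i + 1) none)

def check_alt (word : String) (line : String) : Bool :=
  checkAltLoop word.toList line.toList (line.toList.length + 2) (-1)
    (PySem.Chars.find line.toList word.toList)

-- ===== PRECONDITION & SPEC =====
-- Pre_ excludes the single corner word = "" and line = "": the empty pattern has
-- no canonical semantics and there A's counter artefact yields True while B's gap
-- scan yields False; on every other input (including other empty-pattern inputs)
-- equivalence is proved.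
def Pre_check (word : String) (line : String) : Prop := ¬ (word = "" ∧ line = "")
instance (word : String) (line : String) : Decidable (Pre_check word line) := by unfold Pre_check; infer_instance
def pvWitness_check : String × String := ("ab", "xabyab")

def Spec_check (word : String) (line : String) (out : Bool) : Prop := out = check_alt word line
instance (word : String) (line : String) (out : Bool) : Decidable (Spec_check word line out) := by unfold Spec_check; infer_instance

-- ===== CLAIM (what is proved, stated in full; the proofs are below) =====
def Claim_equal_check : Prop := ∀ (word : String) (line : String), Dom_check word line → Pre_check word line → Spec_check word line (check word line)

-- ===== LEMMAS AND PROOFS =====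

-- `occ w l p`: an occurrence of w starts at position p of l (Python's line[p:p+m] == word for m = len(word) ≤ len(line)-p)
def occ (w l : List Char) (p : Nat) : Prop := w <+: l.drop p

-- characterisation of A's loop state: every position k ≥ i is "safe"
def ACov (w l : List Char) (j i : Nat) : Prop :=
  ∀ k, i ≤ k → k < l.length →
    ((∃ p, i ≤ p ∧ p ≤ k ∧ k < p + w.length ∧ occ w l p) ∨
     ((∀ p, i ≤ p → p ≤ k → ¬ occ w l p) ∧ j + (k - i) + 1 < w.length))

-- characterisation of B's loop state, prev = q - 1
def BCov (w l : List Char) (q : Nat) : Prop :=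
  ∀ k, q ≤ k + 1 → k < l.length →
    (k + 1 < q + w.length ∨ ∃ p, q ≤ p ∧ p ≤ k ∧ k < p + w.length ∧ occ w l p)

theorem occ_drop_iff (w l : List Char) (q : Nat) :
    (w <:+: l.drop q) ↔ ∃ p, q ≤ p ∧ occ w l p := by
  constructor
  · intro h
    have h1 : PySem.Chars.isIn w (l.drop q) = true :=
      (PySem.Chars.isIn_iff_infix w (l.drop q)).2 h
    obtain ⟨j, hj⟩ := (PySem.Chars.exists_prefix_drop_iff_isIn w (l.drop q)).2 h1
    refine ⟨q + j, by omega, ?_⟩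
    unfold occ
    rwa [List.drop_drop] at hj
  · rintro ⟨p, hqp, ho⟩
    have hj : w <+: (l.drop q).drop (p - q) := by
      unfold occ at ho
      rwa [List.drop_drop, Nat.add_comm, Nat.sub_add_cancel hqp]
    have h1 := (PySem.Chars.exists_prefix_drop_iff_isIn w (l.drop q)).1 ⟨p - q, hj⟩
    exact (PySem.Chars.isIn_iff_infix w (l.drop q)).1 h1

theorem slice_eq_iff_occ (w l : List Char) (i : Nat) :
    (PySem.List.slice l (some (i : Int)) (some ((i : Int) + (w.length : Int))) = w) ↔ occ w l i := by
  rw [PySem.List.slice_natCast_add]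
  unfold occ
  rw [List.prefix_iff_eq_take, eq_comm]

theorem ACov_occ (w l : List Char) (hw : w ≠ []) (i j : Nat) (ho : occ w l i) :
    ACov w l j i ↔ ACov w l 0 (i + 1) := by
  have hm : 0 < w.length := List.length_pos_of_ne_nil hw
  constructor
  · intro h k hk1 hk2
    rcases h k (by omega) hk2 with ⟨p, hp1, hp2, hp3, hp4⟩ | ⟨hno, hcnt⟩
    · by_cases hp : i + 1 ≤ p
      · exact Or.inl ⟨p, hp, hp2, hp3, hp4⟩
      · have hpi : p = i := by omega
        by_cases hq : ∃ p', i + 1 ≤ p' ∧ p' ≤ k ∧ occ w l p'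
        · obtain ⟨p', h1, h2, h3⟩ := hq
          exact Or.inl ⟨p', h1, h2, by omega, h3⟩
        · refine Or.inr ⟨fun p' hp' hpk hocc => hq ⟨p', hp', hpk, hocc⟩, by omega⟩
    · exact absurd ho (hno i (le_refl i) (by omega))
  · intro h k hk1 hk2
    by_cases hki : k = i
    · subst hki
      exact Or.inl ⟨k, le_refl k, le_refl k, by omega, ho⟩
    · rcases h k (by omega) hk2 with ⟨p, hp1, hp2, hp3, hp4⟩ | ⟨hno, hcnt⟩
      · exact Or.inl ⟨p, by omega, hp2, hp3, hp4⟩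
      · exact Or.inl ⟨i, le_refl i, by omega, by omega, ho⟩

theorem ACov_nocc (w l : List Char) (i j : Nat) (ho : ¬ occ w l i) (hj : j + 1 < w.length) :
    ACov w l j i ↔ ACov w l (j + 1) (i + 1) := by
  constructor
  · intro h k hk1 hk2
    rcases h k (by omega) hk2 with ⟨p, hp1, hp2, hp3, hp4⟩ | ⟨hno, hcnt⟩
    · have hp : i + 1 ≤ p := by
        rcases Nat.lt_or_ge p (i + 1) with hlt | hge
        · have : p = i := by omega
          subst this; exact absurd hp4 ho
        · exact hge
      exact Or.inl ⟨p, hp, hp2, hp3, hp4⟩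
    · exact Or.inr ⟨fun p h1 h2 => hno p (by omega) h2, by omega⟩
  · intro h k hk1 hk2
    by_cases hki : k = i
    · subst hki
      refine Or.inr ⟨fun p h1 h2 => ?_, by omega⟩
      have : p = k := by omega
      subst this; exact ho
    · rcases h k (by omega) hk2 with ⟨p, hp1, hp2, hp3, hp4⟩ | ⟨hno, hcnt⟩
      · exact Or.inl ⟨p, by omega, hp2, hp3, hp4⟩
      · refine Or.inr ⟨fun p h1 h2 hocc => ?_, by omega⟩
        by_cases hpi : p = i
        · subst hpi; exact ho hocc
        · exact hno p (by omega) h2 hocc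

theorem loopA_eq (w l : List Char) (hw : w ≠ []) :
    ∀ i j, checkLoop w l j i = true ↔ ACov w l j i := by
  have hm : 0 < w.length := List.length_pos_of_ne_nil hw
  intro i j
  induction hni : l.length - i generalizing i j with
  | zero =>
    rw [checkLoop, dif_neg (by omega)]
    simp only [true_iff]
    intro k hk1 hk2
    omega
  | succ d ih =>
    have hi : i < l.length := by omega
    rw [checkLoop, dif_pos hi]
    by_cases ho : occ w l i
    · rw [if_pos ((slice_eq_iff_occ w l i).2 ho)]
      rw [if_neg (by omega)]
      rw [ih (i + 1) 0 (by omega)]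
      exact (ACov_occ w l hw i j ho).symm
    · rw [if_neg (fun hs => ho ((slice_eq_iff_occ w l i).1 hs))]
      by_cases hj : w.length ≤ j + 1
      · rw [if_pos hj]
        constructor
        · intro hff; exact absurd hff (by simp)
        · intro hA
          exfalso
          rcases hA i (le_refl i) hi with ⟨p, hp1, hp2, hp3, hp4⟩ | ⟨hno, hcnt⟩
          · have : p = i := by omega
            subst this; exact ho hp4
          · omega
      · rw [if_neg hj]
        rw [ih (i + 1) (j + 1) (by omega)]
        exact (ACov_nocc w l i j ho (by omega)).symm

theorem occ_bounds (w l : List Char) (hw : w ≠ []) (p : Nat) (ho : occ w l p) :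
    p + w.length ≤ l.length := by
  have := ho.length_le
  rw [List.length_drop] at this
  have hm : 0 < w.length := List.length_pos_of_ne_nil hw
  by_cases hp : p ≤ l.length
  · omega
  · exfalso
    unfold occ at ho
    rw [List.drop_eq_nil_of_le (by omega)] at ho
    exact hw (List.prefix_nil.1 ho)

theorem BCov_done (w l : List Char) (hw : w ≠ []) (q : Nat)
    (hno : ∀ p, q ≤ p → ¬ occ w l p) :
    BCov w l q ↔ l.length + 1 ≤ q + w.length := by
  have hm : 0 < w.length := List.length_pos_of_ne_nil hw
  constructor
  · intro h
    by_contra hbig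
    rcases h (q + w.length - 1) (by omega) (by omega) with hlt | ⟨p, hp1, hp2, hp3, hp4⟩
    · omega
    · exact hno p hp1 hp4
  · intro h k hk1 hk2
    exact Or.inl (by omega)

theorem BCov_step (w l : List Char) (hw : w ≠ []) (q p0 : Nat)
    (ho : occ w l p0) (hq : q ≤ p0)
    (hclose : p0 + 1 ≤ q + w.length) :
    BCov w l q ↔ BCov w l (p0 + 1) := by
  have hm : 0 < w.length := List.length_pos_of_ne_nil hw
  constructor
  · intro h k hk1 hk2
    rcases h k (by omega) hk2 with hlt | ⟨p, hp1, hp2, hp3, hp4⟩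
    · exact Or.inl (by omega)
    · by_cases hp : p ≤ p0
      · exact Or.inl (by omega)
      · exact Or.inr ⟨p, by omega, hp2, hp3, hp4⟩
  · intro h k hk1 hk2
    by_cases hkp : k < p0
    · exact Or.inl (by omega)
    · rcases h k (by omega) hk2 with hlt | ⟨p, hp1, hp2, hp3, hp4⟩
      · exact Or.inr ⟨p0, hq, by omega, by omega, ho⟩
      · exact Or.inr ⟨p, by omega, hp2, hp3, hp4⟩

theorem loopB_eq (w l : List Char) (hw : w ≠ []) :
    ∀ fuel q, q ≤ l.length → l.length + 2 ≤ fuel + q →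
    (checkAltLoop w l fuel ((q : Int) - 1) (PySem.Chars.findFrom l w (q : Int) none)
      = true ↔ BCov w l q) := by
  have hm : 0 < w.length := List.length_pos_of_ne_nil hw
  intro fuel
  induction fuel with
  | zero =>
    intro q hq hfuel
    omega
  | succ fuel ih =>
    intro q hq hfuel
    rw [checkAltLoop]
    by_cases hneg : PySem.Chars.findFrom l w (q : Int) none = -1
    · rw [if_pos hneg]
      have hno : ∀ p, q ≤ p → ¬ occ w l p := by
        intro p hp hocc
        have hinf : w <:+: l.drop q := (occ_drop_iff w l q).2 ⟨p, hp, hocc⟩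
        exact ((PySem.Chars.findFrom_natCast_eq_neg_one_iff l w q hq).1 hneg) hinf
      rw [BCov_done w l hw q hno]
      simp only [decide_eq_true_eq]
      omega
    · obtain ⟨hle, hpre, hmin⟩ := PySem.Chars.findFrom_natCast_spec l w q hq hneg
      set i := PySem.Chars.findFrom l w (q : Int) none with hi
      have hipos : 0 ≤ i := le_trans (by exact_mod_cast Nat.zero_le q) hle
      have hocc : occ w l i.toNat := hpre
      have hbound : i.toNat + w.length ≤ l.length := occ_bounds w l hw i.toNat hocc
      have hqi : q ≤ i.toNat := by omega
      rw [if_neg hneg]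
      by_cases hgap : (w.length : Int) < i - ((q : Int) - 1)
      · rw [if_pos hgap]
        constructor
        · intro hff; exact absurd hff (by simp)
        · intro hB
          exfalso
          have hik : q + w.length ≤ i.toNat := by omega
          rcases hB (q + w.length - 1) (by omega) (by omega) with hlt | ⟨p, hp1, hp2, hp3, hp4⟩
          · omega
          · exact hmin p (by exact_mod_cast hp1) (by omega) hp4
      · rw [if_neg hgap]
        obtain ⟨m0, hji⟩ := Int.eq_ofNat_of_zero_le hipos
        have htn : i.toNat = m0 := by omega
        have hcall : checkAltLoop w l fuel i (PySem.Chars.findFrom l w (i + 1) none)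
            = checkAltLoop w l fuel (((m0 + 1 : Nat) : Int) - 1)
                (PySem.Chars.findFrom l w ((m0 + 1 : Nat) : Int) none) := by
          rw [hji]
          norm_num
        rw [hcall]
        rw [ih (m0 + 1) (by omega) (by omega)]
        rw [← htn]
        exact (BCov_step w l hw q i.toNat hocc hqi (by omega)).symm

theorem cov_zero_iff (w l : List Char) (hw : w ≠ []) :
    ACov w l 0 0 ↔ BCov w l 0 := by
  have hm : 0 < w.length := List.length_pos_of_ne_nil hw
  constructor
  · intro h k hk1 hk2
    rcases h k (Nat.zero_le k) hk2 with ⟨p, hp1, hp2, hp3, hp4⟩ | ⟨hno, hcnt⟩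
    · exact Or.inr ⟨p, hp1, hp2, hp3, hp4⟩
    · exact Or.inl (by omega)
  · intro h k hk1 hk2
    rcases h k (by omega) hk2 with hlt | ⟨p, hp1, hp2, hp3, hp4⟩
    · by_cases hq : ∃ p, p ≤ k ∧ occ w l p
      · obtain ⟨p, h1, h2⟩ := hq
        exact Or.inl ⟨p, Nat.zero_le p, h1, by omega, h2⟩
      · exact Or.inr ⟨fun p _ h2 hocc => hq ⟨p, h2, hocc⟩, by omega⟩
    · exact Or.inl ⟨p, hp1, hp2, hp3, hp4⟩

-- ===== VERDICT (by name: the statement is the Claim_ definition above) =====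
theorem check_spec : Claim_equal_check := by
  intro word line _hdom hpre
  unfold Spec_check
  by_cases hw0 : word.toList = []
  · -- empty pattern on a nonempty line: both sides return false
    have hword : word = "" := String.toList_eq_nil_iff.1 hw0
    have hl : line.toList ≠ [] := fun h =>
      hpre ⟨hword, String.toList_eq_nil_iff.1 h⟩
    have hlp : 0 < line.toList.length := List.length_pos_of_ne_nil hl
    unfold check check_alt
    rw [hw0]
    have hA : checkLoop [] line.toList 0 0 = false := by
      rw [checkLoop, dif_pos hlp]
      simp
    have hB : checkAltLoop [] line.toList (line.toList.length + 2) (-1)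
        (PySem.Chars.find line.toList []) = false := by
      rw [PySem.Chars.find_nil]
      show checkAltLoop [] line.toList ((line.toList.length + 1) + 1) (-1) 0 = false
      rw [checkAltLoop]
      norm_num
    rw [hA, hB]
  · have hw : word.toList ≠ [] := hw0
    rw [Bool.eq_iff_iff]
    unfold check check_alt
    rw [loopA_eq word.toList line.toList hw 0 0]
    have hfind : PySem.Chars.find line.toList word.toList
        = PySem.Chars.findFrom line.toList word.toList ((0 : Nat) : Int) none := by
      simp [PySem.Chars.findFrom_zero]
    have hneg1 : (-1 : Int) = ((0 : Nat) : Int) - 1 := by norm_num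
    rw [hfind, hneg1]
    rw [loopB_eq word.toList line.toList hw (line.toList.length + 2) 0 (Nat.zero_le _) (by omega)]
    exact cov_zero_iff word.toList line.toList hw
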